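-- pv_equiv track=rewrite | github.com/PlusLabNLP/EventPlus | component/BETTER/joint/EventPipeline.py | get_tri_idx_from_mix_sent
-- ===== SOURCE A (Python) =====
-- def get_tri_idx_from_mix_sent(out_t, B2I):
--     '''
--     get trigger idx from a sent with possibly MULTIPLE events
--     it is expected that the `out_t` is the predited trigger sequences from model
--     it finds the idxs for BIO chunks
--     '''
--     tri_idx = []
--     tri_type = []
--     in_chunk = False
--     curr_idx = []
--     curr_I = None
--     for i in range(len(out_t)):
--         # end of chunk
--         if in_chunk:
--             if out_t[i] != curr_I:
--                 tri_idx.append(curr_idx)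
--                 tri_type.append(curr_I)
--                 curr_idx = []
--                 curr_I = None
--                 in_chunk = False
--             elif out_t[i] == curr_I:
--                 curr_idx.append(i)
--                 if i == len(out_t) - 1:
--                     # the last token is a I token
--                     tri_idx.append(curr_idx)
--                     tri_type.append(curr_I)
--
--         # beginning of chunk
--         if out_t[i] in B2I:
--             curr_idx = [i]
--             in_chunk = True
--             curr_I = B2I[out_t[i]]
--             if i == len(out_t) - 1:
--                 # the last token is a B token
--                 tri_idx.append(curr_idx)
--                 tri_type.append(curr_I)
--
--     assert len(tri_idx) == len(tri_type)
--     return tri_idx, tri_type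
-- ===== SOURCE B (Python) =====
-- def get_tri_idx_from_mix_sent(out_t, B2I):
--     '''
--     get trigger idx from a sent with possibly MULTIPLE events
--     index-driven scan: a B-token opens a chunk, an inner loop consumes
--     the run of matching I-tokens, then the chunk is emitted
--     '''
--     tri_idx = []
--     tri_type = []
--     n = len(out_t)
--     i = 0
--     while i < n:
--         if out_t[i] in B2I:
--             I = B2I[out_t[i]]
--             chunk = [i]
--             i += 1
--             while i < n and out_t[i] == I:
--                 chunk.append(i)
--                 i += 1
--             tri_idx.append(chunk)
--             tri_type.append(I)
--         else:
--             i += 1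
--     return tri_idx, tri_type
-- ===== Notes on version B (the rewrite author's own statement) =====
-- stated objective: simpler
-- what changed: Replaced A's per-token state machine (in_chunk flag, curr_idx/curr_I carry-over, two last-token special cases) by an index-driven outer scan with an inner run-consuming loop that emits each chunk once, with no flag and no end-of-sequence special casing.
-- intended difference: On inputs where some token's B2I image equals the next token and that next token is itself a B2I key, A appends the token to the open chunk and then restarts a chunk at it, silently discarding or duplicating the open chunk (e.g. ['B','I'] with {'B':'I','I':'I'} gives ([[0,1],[1]],['I','I'])); B keeps the whole run as one chunk ([[0,1]],['I']), the intended BIO reading. — e.g. on get_tri_idx_from_mix_sent(["B", "I"], [("B", "I"), ("I", "I")]): A returns ([[0, 1], [1]], ["I", "I"]), B returns ([[0, 1]], ["I"])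
import Mathlib
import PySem

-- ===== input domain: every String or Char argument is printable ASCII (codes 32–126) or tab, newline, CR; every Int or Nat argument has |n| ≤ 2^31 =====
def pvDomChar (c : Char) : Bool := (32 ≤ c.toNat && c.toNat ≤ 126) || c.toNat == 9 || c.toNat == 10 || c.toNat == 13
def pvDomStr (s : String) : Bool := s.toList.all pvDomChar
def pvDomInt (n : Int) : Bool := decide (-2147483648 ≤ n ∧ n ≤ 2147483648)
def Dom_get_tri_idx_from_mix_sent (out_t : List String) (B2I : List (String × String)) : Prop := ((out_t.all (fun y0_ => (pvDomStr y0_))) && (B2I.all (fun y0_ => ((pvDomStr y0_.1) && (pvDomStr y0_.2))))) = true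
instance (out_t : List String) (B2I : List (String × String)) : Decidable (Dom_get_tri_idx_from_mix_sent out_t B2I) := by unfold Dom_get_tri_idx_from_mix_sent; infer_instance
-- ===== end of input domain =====

-- B replaces A's in_chunk flag and last-token special cases by an outer index scan with an
-- inner run-consuming loop (objective: simpler); on inputs where a B2I key is also the matching
-- I-value A silently drops or duplicates chunks, and B's single-chunk reading is the intended one (D_ below).

-- ===== PORT A =====
-- loop body of A's `for i in range(len(out_t))`; state = (tri_idx, tri_type, in_chunk, curr_idx, curr_I)
-- (curr_I is Option String for Python's None; it is `some _` whenever appended, so `.getD ""` is never taken)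
def pvAStep (out_t : List String) (B2I : List (String × String))
    (s : List (List Int) × List String × Bool × List Int × Option String) (i : Nat) :
    List (List Int) × List String × Bool × List Int × Option String :=
  let (tri_idx, tri_type, in_chunk, curr_idx, curr_I) := s
  -- end of chunk
  let (tri_idx, tri_type, in_chunk, curr_idx, curr_I) :=
    if in_chunk then
      if some (out_t.getD i "") ≠ curr_I then
        (tri_idx ++ [curr_idx], tri_type ++ [curr_I.getD ""], false, ([] : List Int), (none : Option String))
      else
        let curr_idx := curr_idx ++ [(i : Int)]
        if i = out_t.length - 1 then
          (tri_idx ++ [curr_idx], tri_type ++ [curr_I.getD ""], in_chunk, curr_idx, curr_I)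
        else (tri_idx, tri_type, in_chunk, curr_idx, curr_I)
    else (tri_idx, tri_type, in_chunk, curr_idx, curr_I)
  -- beginning of chunk
  if (PySem.Dict.mk B2I).contains (out_t.getD i "") then
    let curr_idx := [(i : Int)]
    let curr_I := (PySem.Dict.mk B2I).get? (out_t.getD i "")
    if i = out_t.length - 1 then
      (tri_idx ++ [curr_idx], tri_type ++ [curr_I.getD ""], true, curr_idx, curr_I)
    else (tri_idx, tri_type, true, curr_idx, curr_I)
  else (tri_idx, tri_type, in_chunk, curr_idx, curr_I)

def get_tri_idx_from_mix_sent (out_t : List String) (B2I : List (String × String)) :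
    List (List Int) × List String :=
  let s := (List.range out_t.length).foldl (pvAStep out_t B2I) ([], [], false, [], none)
  (s.1, s.2.1)

-- ===== PORT B =====
-- inner while of Source B: consume the run of tokens equal to I; returns (chunk tail, rest, next index)
def pvEatRun (I : String) : List String → Nat → List Int × List String × Nat
  | [], i => ([], [], i)
  | t :: rest, i =>
    if t = I then
      let r := pvEatRun I rest (i + 1)
      ((i : Int) :: r.1, r.2.1, r.2.2)
    else ([], t :: rest, i)

-- outer while of Source B, over the remaining suffix, carrying the absolute index i
-- (fuel is a totality device only: it starts at out_t.length and never runs out, since each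
-- step consumes at least one token of the suffix)
def pvAltGo (d : PySem.Dict String String) : Nat → List String → Nat → List (List Int) × List String
  | _, [], _ => ([], [])
  | 0, _ :: _, _ => ([], [])
  | fuel + 1, t :: rest, i =>
    if d.contains t then
      let I := (d.get? t).getD ""
      let er := pvEatRun I rest (i + 1)
      let res := pvAltGo d fuel er.2.1 er.2.2
      (((i : Int) :: er.1) :: res.1, I :: res.2)
    else pvAltGo d fuel rest (i + 1)

def get_tri_idx_from_mix_sent_alt (out_t : List String) (B2I : List (String × String)) :
    List (List Int) × List String :=
  pvAltGo (PySem.Dict.mk B2I) out_t.length out_t 0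

-- ===== PRECONDITION & SPEC =====
-- On inputs where some token maps (by B2I) to a next token that is itself a B2I key, A appends the
-- next token to the open chunk AND restarts a chunk at it, silently discarding or duplicating the
-- open chunk; B keeps the whole run as one chunk, which is the intended BIO reading.
def D_get_tri_idx_from_mix_sent (out_t : List String) (B2I : List (String × String)) : Prop :=
  ∃ i < out_t.length, i + 1 < out_t.length ∧
    (PySem.Dict.mk B2I).get? (out_t.getD i "") = some (out_t.getD (i + 1) "") ∧
    (PySem.Dict.mk B2I).contains (out_t.getD (i + 1) "") = true

instance (out_t : List String) (B2I : List (String × String)) :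
    Decidable (D_get_tri_idx_from_mix_sent out_t B2I) := by
  unfold D_get_tri_idx_from_mix_sent; infer_instance

def Spec_get_tri_idx_from_mix_sent (out_t : List String) (B2I : List (String × String))
    (out : List (List Int) × List String) : Prop :=
  ¬ D_get_tri_idx_from_mix_sent out_t B2I → out = get_tri_idx_from_mix_sent_alt out_t B2I

instance (out_t : List String) (B2I : List (String × String)) (out : List (List Int) × List String) :
    Decidable (Spec_get_tri_idx_from_mix_sent out_t B2I out) := by
  unfold Spec_get_tri_idx_from_mix_sent; infer_instance

def pvDiffWitness_get_tri_idx_from_mix_sent : List String × (List (String × String)) :=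
  (["B", "I"], [("B", "I"), ("I", "I")])

def pvDiffWitnessOut_get_tri_idx_from_mix_sent :
    (List (List Int) × List String) × (List (List Int) × List String) :=
  (([[0, 1], [1]], ["I", "I"]), ([[0, 1]], ["I"]))

-- ===== CLAIM (what is proved, stated in full; the proofs are below) =====
def Claim_unchanged_get_tri_idx_from_mix_sent : Prop := ∀ (out_t : List String) (B2I : List (String × String)), Dom_get_tri_idx_from_mix_sent out_t B2I → Spec_get_tri_idx_from_mix_sent out_t B2I (get_tri_idx_from_mix_sent out_t B2I)
def Claim_changed_get_tri_idx_from_mix_sent : Prop := Dom_get_tri_idx_from_mix_sent (pvDiffWitness_get_tri_idx_from_mix_sent.1) (pvDiffWitness_get_tri_idx_from_mix_sent.2) ∧ D_get_tri_idx_from_mix_sent (pvDiffWitness_get_tri_idx_from_mix_sent.1) (pvDiffWitness_get_tri_idx_from_mix_sent.2) ∧ get_tri_idx_from_mix_sent (pvDiffWitness_get_tri_idx_from_mix_sent.1) (pvDiffWitness_get_tri_idx_from_mix_sent.2) = pvDiffWitnessOut_get_tri_idx_from_mix_sent.1 ∧ get_tri_idx_from_mix_sent_alt (pvDiffWitness_get_tri_idx_from_mix_sent.1)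 (pvDiffWitness_get_tri_idx_from_mix_sent.2) = pvDiffWitnessOut_get_tri_idx_from_mix_sent.2 ∧ pvDiffWitnessOut_get_tri_idx_from_mix_sent.1 ≠ pvDiffWitnessOut_get_tri_idx_from_mix_sent.2

-- ===== LEMMAS AND PROOFS =====

theorem pvEatRun_len (I : String) (l : List String) (i : Nat) :
    (pvEatRun I l i).2.1.length ≤ l.length := by
  induction l generalizing i with
  | nil => simp [pvEatRun]
  | cons t rest ih =>
    simp only [pvEatRun]
    split
    · exact Nat.le_succ_of_le (ih (i + 1))
    · simp

theorem pvAltGo_nil (d : PySem.Dict String String) (f i : Nat) :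
    pvAltGo d f [] i = ([], []) := by cases f <;> rfl

theorem pvAltGo_fuel (d : PySem.Dict String String) :
    ∀ (f1 f2 : Nat) (l : List String) (i : Nat), l.length ≤ f1 → l.length ≤ f2 →
      pvAltGo d f1 l i = pvAltGo d f2 l i := by
  intro f1
  induction f1 with
  | zero =>
    intro f2 l i h1 _
    have hl : l = [] := List.eq_nil_of_length_eq_zero (Nat.le_zero.mp h1)
    subst hl; rw [pvAltGo_nil, pvAltGo_nil]
  | succ f1 ih =>
    intro f2 l i h1 h2
    cases l with
    | nil => rw [pvAltGo_nil, pvAltGo_nil]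
    | cons t rest =>
      cases f2 with
      | zero => simp at h2
      | succ f2 =>
        simp only [pvAltGo]
        have hr : rest.length ≤ f1 := by simpa using h1
        have hr2 : rest.length ≤ f2 := by simpa using h2
        have he := pvEatRun_len ((d.get? t).getD "") rest (i + 1)
        split
        · rw [ih f2 _ _ (le_trans he hr) (le_trans he hr2)]
        · exact ih f2 _ _ hr hr2

theorem pvAltGo_cons_len (d : PySem.Dict String String) (t : String) (rest : List String)
    (i N : Nat) (h : rest.length < N) :
    pvAltGo d N (t :: rest) i =
      if d.contains t then
        let I := (d.get? t).getD ""
        let er := pvEatRun I rest (i + 1)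
        let res := pvAltGo d N er.2.1 er.2.2
        (((i : Int) :: er.1) :: res.1, I :: res.2)
      else pvAltGo d N rest (i + 1) := by
  obtain ⟨f, rfl⟩ : ∃ f, N = f + 1 := ⟨N - 1, by omega⟩
  have hr : rest.length ≤ f := by omega
  have he := pvEatRun_len ((d.get? t).getD "") rest (i + 1)
  simp only [pvAltGo]
  split
  · rw [pvAltGo_fuel d f (f + 1) _ _ (le_trans he hr) (le_trans he (by omega))]
  · rw [pvAltGo_fuel d f (f + 1) _ _ hr (by omega)]

theorem pvND (out_t : List String) (B2I : List (String × String))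
    (hnd : ¬ D_get_tri_idx_from_mix_sent out_t B2I) (a : Nat) (h1 : a + 1 < out_t.length)
    (h2 : (PySem.Dict.mk B2I).get? (out_t.getD a "") = some (out_t.getD (a + 1) ""))
    : (PySem.Dict.mk B2I).contains (out_t.getD (a + 1) "") = false := by
  by_contra h
  exact hnd ⟨a, by omega, h1, h2, by simpa using h⟩

theorem pvMain (out_t : List String) (B2I : List (String × String))
    (hnd : ¬ D_get_tri_idx_from_mix_sent out_t B2I) : ∀ k : Nat,
    (∀ (a : Nat) (ti : List (List Int)) (ty : List String), a + k = out_t.length →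
      ((List.foldl (pvAStep out_t B2I) (ti, ty, false, [], none) (List.range' a k)).1,
       (List.foldl (pvAStep out_t B2I) (ti, ty, false, [], none) (List.range' a k)).2.1) =
        (ti ++ (pvAltGo (PySem.Dict.mk B2I) out_t.length (out_t.drop a) a).1,
         ty ++ (pvAltGo (PySem.Dict.mk B2I) out_t.length (out_t.drop a) a).2))
    ∧
    (∀ (a : Nat) (ti : List (List Int)) (ty : List String) (ci : List Int) (I : String),
      a + k = out_t.length → 1 ≤ k →
      (out_t.getD a "" = I → (PySem.Dict.mk B2I).contains I = false) →
      ((List.foldl (pvAStep out_t B2I) (ti, ty, true, ci, some I) (List.range' a k)).1,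
       (List.foldl (pvAStep out_t B2I) (ti, ty, true, ci, some I) (List.range' a k)).2.1) =
        (ti ++ (ci ++ (pvEatRun I (out_t.drop a) a).1) ::
              (pvAltGo (PySem.Dict.mk B2I) out_t.length (pvEatRun I (out_t.drop a) a).2.1
                 (pvEatRun I (out_t.drop a) a).2.2).1,
         ty ++ I ::
              (pvAltGo (PySem.Dict.mk B2I) out_t.length (pvEatRun I (out_t.drop a) a).2.1
                 (pvEatRun I (out_t.drop a) a).2.2).2)) := by
  intro k
  induction k with
  | zero =>
    constructor
    · intro a ti ty ha
      have hd : out_t.drop a = [] := by rw [List.drop_eq_nil_iff]; omega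
      simp [List.range'_zero, hd, pvAltGo_nil]
    · intro a ti ty ci I ha hk _
      omega
  | succ k ih =>
    have hpart1 : ∀ (a : Nat) (ti : List (List Int)) (ty : List String),
        a + (k + 1) = out_t.length →
        ((List.foldl (pvAStep out_t B2I) (ti, ty, false, [], none) (List.range' a (k + 1))).1,
         (List.foldl (pvAStep out_t B2I) (ti, ty, false, [], none) (List.range' a (k + 1))).2.1) =
          (ti ++ (pvAltGo (PySem.Dict.mk B2I) out_t.length (out_t.drop a) a).1,
           ty ++ (pvAltGo (PySem.Dict.mk B2I) out_t.length (out_t.drop a) a).2) := by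
      intro a ti ty ha
      have hal : a < out_t.length := by omega
      have hgd : out_t.getD a "" = out_t[a] := List.getD_eq_getElem out_t "" hal
      have hdrop : out_t.drop a = out_t[a] :: out_t.drop (a + 1) := List.drop_eq_getElem_cons hal
      have hrl : (out_t.drop (a + 1)).length < out_t.length := by
        rw [List.length_drop]; omega
      rw [List.range'_succ, List.foldl_cons, hdrop, pvAltGo_cons_len _ _ _ _ _ hrl]
      by_cases hc : (PySem.Dict.mk B2I).contains out_t[a] = true
      · obtain ⟨Iv, hIv⟩ : ∃ v, (PySem.Dict.mk B2I).get? out_t[a] = some v := by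
          rw [PySem.Dict.contains_eq_isSome_get?] at hc
          exact Option.isSome_iff_exists.mp hc
        by_cases hlast : a = out_t.length - 1
        · have hk0 : k = 0 := by omega
          subst hk0
          have hd2 : out_t.drop (a + 1) = [] := by rw [List.drop_eq_nil_iff]; omega
          rw [List.range'_zero, List.foldl_nil]
          simp only [pvAStep]
          rw [hgd, hc, hIv]
          simp [if_pos hlast, hd2, pvEatRun, pvAltGo_nil]
        · have hk1 : 1 ≤ k := by omega
          have hstep : pvAStep out_t B2I (ti, ty, false, [], none) a
              = (ti, ty, true, [(a : Int)], some Iv) := by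
            simp only [pvAStep]
            rw [hgd, hc, hIv]
            simp [hlast]
          rw [hstep]
          have hinv : out_t.getD (a + 1) "" = Iv →
              (PySem.Dict.mk B2I).contains Iv = false := by
            intro hv
            have h := pvND out_t B2I hnd a (by omega) (by rw [hgd, hIv, hv])
            rwa [hv] at h
          have h2 := (ih.2) (a + 1) ti ty [(a : Int)] Iv (by omega) hk1 hinv
          rw [h2, hc, hIv]
          simp
      · have hcf : (PySem.Dict.mk B2I).contains out_t[a] = false := by
          revert hc; cases (PySem.Dict.mk B2I).contains out_t[a] <;> simp
        have hstep : pvAStep out_t B2I (ti, ty, false, [], none) a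
            = (ti, ty, false, [], none) := by
          simp only [pvAStep]
          rw [hgd, hcf]
          simp
        rw [hstep, hcf]
        simpa using (ih.1) (a + 1) ti ty (by omega)
    refine ⟨hpart1, ?_⟩
    intro a ti ty ci I ha _ hinv
    have hal : a < out_t.length := by omega
    have hgd : out_t.getD a "" = out_t[a] := List.getD_eq_getElem out_t "" hal
    have hdrop : out_t.drop a = out_t[a] :: out_t.drop (a + 1) := List.drop_eq_getElem_cons hal
    by_cases htI : out_t[a] = I
    · have hcI : (PySem.Dict.mk B2I).contains I = false := hinv (by rw [hgd, htI])
      by_cases hlast : a = out_t.length - 1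
      · have hk0 : k = 0 := by omega
        subst hk0
        have hd2 : out_t.drop (a + 1) = [] := by rw [List.drop_eq_nil_iff]; omega
        rw [List.range'_succ, List.foldl_cons, List.range'_zero, List.foldl_nil, hdrop, htI]
        simp only [pvAStep]
        rw [hgd, htI, hcI]
        simp [if_pos hlast, hd2, pvEatRun, pvAltGo_nil]
      · have hk1 : 1 ≤ k := by omega
        have hstep : pvAStep out_t B2I (ti, ty, true, ci, some I) a
            = (ti, ty, true, ci ++ [(a : Int)], some I) := by
          simp only [pvAStep]
          rw [hgd, htI, hcI]
          simp [hlast]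
        rw [List.range'_succ, List.foldl_cons, hstep, hdrop, htI]
        have hinv' : out_t.getD (a + 1) "" = I →
            (PySem.Dict.mk B2I).contains I = false := fun _ => hcI
        have h2 := (ih.2) (a + 1) ti ty (ci ++ [(a : Int)]) I (by omega) hk1 hinv'
        rw [h2]
        simp [pvEatRun]
    · have hflush : pvAStep out_t B2I (ti, ty, true, ci, some I) a
          = pvAStep out_t B2I (ti ++ [ci], ty ++ [I], false, [], none) a := by
        simp only [pvAStep]
        rw [hgd]
        simp [htI]
      have hfold : List.foldl (pvAStep out_t B2I) (ti, ty, true, ci, some I)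
            (List.range' a (k + 1))
          = List.foldl (pvAStep out_t B2I) (ti ++ [ci], ty ++ [I], false, [], none)
            (List.range' a (k + 1)) := by
        rw [List.range'_succ, List.foldl_cons, List.foldl_cons, hflush]
      rw [hfold, hpart1 a (ti ++ [ci]) (ty ++ [I]) ha, hdrop]
      simp [pvEatRun, htI]

-- ===== VERDICT (by name: the statement is the Claim_ definition above) =====
theorem get_tri_idx_from_mix_sent_spec : Claim_unchanged_get_tri_idx_from_mix_sent := by
  intro out_t B2I _ hnd
  have h := (pvMain out_t B2I hnd out_t.length).1 0 [] [] (by omega)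
  simpa [get_tri_idx_from_mix_sent, get_tri_idx_from_mix_sent_alt, List.range_eq_range'] using h

theorem get_tri_idx_from_mix_sent_changed : Claim_changed_get_tri_idx_from_mix_sent := by
  unfold Claim_changed_get_tri_idx_from_mix_sent; decide
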